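-- pv_equiv track=rewrite | github.com/leeyun/pythonP | Baekjoon/2805.py | solution
-- ===== SOURCE A (Python) =====
-- def solution(demand, tree):
--     start = 1
--     end = max(tree)
--     middle = (start+end)//2
--     while start <= end:
--         log = 0
--         for i in tree:
--             if i >= middle:
--                 log += i - middle
--         if log < demand:
--             end = middle -1
--         elif log == demand:
--             return middle
--         else:
--             start = middle + 1
--         middle = (start+end)//2
--     return middle
-- ===== SOURCE B (Python) =====
-- def _bisect_left(s, x):
--     lo, hi = 0, len(s)
--     while lo < hi:
--         mid = (lo + hi) // 2
--         if s[mid] < x: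
--             lo = mid + 1
--         else:
--             hi = mid
--     return lo
--
--
-- def solution(demand, tree):
--     s = sorted(tree)
--     n = len(s)
--     prefix = [0]
--     run = 0
--     for v in s:
--         run += v
--         prefix.append(run)
--     total = run
--     start, end = 1, s[-1]
--     while start <= end:
--         middle = (start + end) // 2
--         j = _bisect_left(s, middle)
--         log = (total - prefix[j]) - middle * (n - j)
--         if log < demand:
--             end = middle - 1
--         elif log == demand:
--             return middle
--         else:
--             start = middle + 1
--     return (start + end) // 2
-- ===== Notes on version B (the rewrite author's own statement) =====
-- stated objective: alternative
-- what changed: Each candidate height is evaluated via a pre-sorted tree list with prefix sums and a hand-rolled binary search, instead of rescanning all n trees inside every binary-search step.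
import Mathlib
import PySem

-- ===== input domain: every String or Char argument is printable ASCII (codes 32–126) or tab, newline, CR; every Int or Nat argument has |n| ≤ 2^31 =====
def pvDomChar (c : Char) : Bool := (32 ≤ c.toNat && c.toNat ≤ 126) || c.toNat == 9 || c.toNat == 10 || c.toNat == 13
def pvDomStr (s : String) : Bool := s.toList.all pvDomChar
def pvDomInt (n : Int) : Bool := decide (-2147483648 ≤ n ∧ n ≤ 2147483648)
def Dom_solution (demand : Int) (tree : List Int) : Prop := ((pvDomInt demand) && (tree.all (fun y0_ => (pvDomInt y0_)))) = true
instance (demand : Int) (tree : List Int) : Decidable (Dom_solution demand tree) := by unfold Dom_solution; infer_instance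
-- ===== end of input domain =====

-- B replaces A's rescan of all trees per binary-search step by a pre-sorted list
-- with prefix sums, evaluating each candidate height by an inner binary search (objective: alternative algorithm).
-- Both Pythons raise on an empty tree (max([]) / s[-1]), so Pre_ requires a nonempty list.

-- ===== PORT A =====
-- inner 'for i in tree: if i >= middle: log += i - middle'
def cutA (tree : List Int) (middle : Int) : Int :=
  tree.foldl (fun log i => if i ≥ middle then log + (i - middle) else log) 0

-- 'while start <= end: …' (middle is recomputed from the current start/end at each test)
def loopA (demand : Int) (tree : List Int) (start end_ : Int) : Int :=
  if _h : start ≤ end_ then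
    let middle := PySem.Int.floordiv (start + end_) 2
    let log := cutA tree middle
    if log < demand then loopA demand tree start (middle - 1)
    else if log = demand then middle
    else loopA demand tree (middle + 1) end_
  else PySem.Int.floordiv (start + end_) 2
termination_by (end_ + 1 - start).toNat
decreasing_by
  · have := PySem.Int.floordiv_two_mid_bounds (lo := start) (hi := end_) _h
    omega
  · have := PySem.Int.floordiv_two_mid_bounds (lo := start) (hi := end_) _h
    omega

def solution (demand : Int) (tree : List Int) : Int :=
  match PySem.List.max? tree (fun x => x) with
  | none => 0        -- max([]) raises ValueError: excluded by Pre_solution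
  | some m => loopA demand tree 1 m

-- ===== PORT B =====
-- hand-rolled bisect_left from Source B
def bisectB (s : List Int) (x lo hi : Int) : Int :=
  if _h : lo < hi then
    let mid := PySem.Int.floordiv (lo + hi) 2
    if PySem.List.pyGetD s mid 0 < x then bisectB s x (mid + 1) hi
    else bisectB s x lo mid
  else lo
termination_by (hi - lo).toNat
decreasing_by
  · have := PySem.Int.floordiv_two_mid_bounds (lo := lo) (hi := hi) (le_of_lt _h)
    have : PySem.Int.floordiv (lo + hi) 2 < hi := by
      rw [PySem.Int.floordiv_lt_iff_lt_mul (by omega)]; omega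
    omega
  · have := PySem.Int.floordiv_two_mid_bounds (lo := lo) (hi := hi) (le_of_lt _h)
    have : PySem.Int.floordiv (lo + hi) 2 < hi := by
      rw [PySem.Int.floordiv_lt_iff_lt_mul (by omega)]; omega
    omega

-- 'prefix = [0]; run = 0; for v in s: run += v; prefix.append(run)'
def prefixB (s : List Int) : List Int × Int :=
  s.foldl (fun acc v => (acc.1 ++ [acc.2 + v], acc.2 + v)) ([0], 0)

-- one iteration's 'log' from the precomputed data
def cutB (s pre : List Int) (total n middle : Int) : Int :=
  let j := bisectB s middle 0 (s.length : Int)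
  (total - PySem.List.pyGetD pre j 0) - middle * (n - j)

def loopB (demand : Int) (s pre : List Int) (total n : Int) (start end_ : Int) : Int :=
  if _h : start ≤ end_ then
    let middle := PySem.Int.floordiv (start + end_) 2
    let log := cutB s pre total n middle
    if log < demand then loopB demand s pre total n start (middle - 1)
    else if log = demand then middle
    else loopB demand s pre total n (middle + 1) end_
  else PySem.Int.floordiv (start + end_) 2
termination_by (end_ + 1 - start).toNat
decreasing_by
  · have := PySem.Int.floordiv_two_mid_bounds (lo := start) (hi := end_) _h
    omega
  · have := PySem.Int.floordiv_two_mid_bounds (lo := start) (hi := end_) _h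
    omega

def solution_alt (demand : Int) (tree : List Int) : Int :=
  let s := PySem.List.sorted tree (fun x => x) false
  let p := prefixB s
  match PySem.List.pyGet? s (-1) with
  | none => 0        -- s[-1] raises IndexError: excluded by Pre_solution
  | some last => loopB demand s p.1 p.2 (s.length : Int) 1 last

-- ===== PRECONDITION & SPEC =====
-- Pre_ excludes only the empty list, on which A raises ValueError (max of empty sequence).
def Pre_solution (demand : Int) (tree : List Int) : Prop := tree ≠ []
instance (demand : Int) (tree : List Int) : Decidable (Pre_solution demand tree) := by unfold Pre_solution; infer_instance
def pvWitness_solution : Int × List Int := (7, [20, 15, 10, 17])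

def Spec_solution (demand : Int) (tree : List Int) (out : Int) : Prop := out = solution_alt demand tree
instance (demand : Int) (tree : List Int) (out : Int) : Decidable (Spec_solution demand tree out) := by unfold Spec_solution; infer_instance

-- ===== CLAIM (what is proved, stated in full; the proofs are below) =====
def Claim_equal_solution : Prop := ∀ (demand : Int) (tree : List Int), Dom_solution demand tree → Pre_solution demand tree → Spec_solution demand tree (solution demand tree)

-- ===== LEMMAS AND PROOFS =====

-- proof-only helper: the list the prefix-sum fold builds
def prefAux : List Int → Int → List Int
  | [], _ => []
  | v :: t, r => (r + v) :: prefAux t (r + v)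

theorem prefixB_go (s : List Int) : ∀ (p : List Int) (r : Int),
    s.foldl (fun acc v => (acc.1 ++ [acc.2 + v], acc.2 + v)) (p, r) = (p ++ prefAux s r, r + s.sum) := by
  induction s with
  | nil => intro p r; simp [prefAux]
  | cons v t ih =>
    intro p r
    simp only [List.foldl_cons, ih, prefAux, List.sum_cons, List.append_assoc,
      List.singleton_append, Prod.mk.injEq]
    exact ⟨trivial, by ring⟩

theorem prefixB_eq (s : List Int) : prefixB s = (0 :: prefAux s 0, s.sum) := by
  unfold prefixB
  rw [prefixB_go s [0] 0]
  simp

theorem prefAux_length (s : List Int) : ∀ r, (prefAux s r).length = s.length := by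
  induction s with
  | nil => intro r; rfl
  | cons v t ih => intro r; simp [prefAux, ih]

theorem prefAux_getD (s : List Int) : ∀ (k : Nat) (r : Int), k < s.length →
    (prefAux s r).getD k 0 = r + (s.take (k + 1)).sum := by
  induction s with
  | nil => intro k r h; simp at h
  | cons v t ih =>
    intro k r h
    cases k with
    | zero => simp [prefAux]
    | succ k' =>
      simp only [prefAux, List.getD_cons_succ, List.take_succ_cons, List.sum_cons]
      rw [ih k' (r + v) (by simpa using h)]
      ring

theorem getD_mono_of_pairwise (s : List Int) (hp : s.Pairwise (· ≤ ·)) (i j : Nat)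
    (hj : j < s.length) (hij : i ≤ j) : s.getD i 0 ≤ s.getD j 0 := by
  rcases Nat.lt_or_ge i j with h | h
  · rw [List.getD_eq_getElem s 0 (by omega), List.getD_eq_getElem s 0 hj]
    exact (List.pairwise_iff_getElem.mp hp) i j (by omega) hj h
  · have : i = j := by omega
    subst this; exact le_refl _

theorem bisectB_spec (s : List Int) (hp : s.Pairwise (· ≤ ·)) (x : Int) :
    ∀ (lo hi : Int), 0 ≤ lo → lo ≤ hi → hi ≤ (s.length : Int) →
    (∀ k : Nat, k < s.length → (k : Int) < lo → s.getD k 0 < x) →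
    (∀ k : Nat, k < s.length → hi ≤ (k : Int) → x ≤ s.getD k 0) →
    lo ≤ bisectB s x lo hi ∧ bisectB s x lo hi ≤ hi ∧
    (∀ k : Nat, k < s.length → (k : Int) < bisectB s x lo hi → s.getD k 0 < x) ∧
    (∀ k : Nat, k < s.length → bisectB s x lo hi ≤ (k : Int) → x ≤ s.getD k 0) := by
  intro lo hi
  fun_induction bisectB s x lo hi with
  | case1 lo hi h mid hlt ih =>
    intro h0 hlh hhn inv1 inv2
    have hmb := PySem.Int.floordiv_two_mid_bounds (lo := lo) (hi := hi) (le_of_lt h)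
    have hmhi : mid < hi := by
      show PySem.Int.floordiv (lo + hi) 2 < hi
      rw [PySem.Int.floordiv_lt_iff_lt_mul (by omega)]; omega
    have hmlen : mid.toNat < s.length := by omega
    have hget : PySem.List.pyGetD s mid 0 = s.getD mid.toNat 0 := by
      rw [PySem.List.pyGetD_eq_getElem s 0 (by omega) (lt_of_lt_of_le hmhi hhn)]
      rw [List.getD_eq_getElem s 0 hmlen]
    rw [hget] at hlt
    have hres := ih (by omega) (by omega) hhn
      (by
        intro k hk hk2
        rcases Int.lt_or_le (k : Int) lo with h' | h'
        · exact inv1 k hk h'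
        · have hkm : k ≤ mid.toNat := by omega
          exact lt_of_le_of_lt (getD_mono_of_pairwise s hp k mid.toNat hmlen hkm) hlt)
      inv2
    refine ⟨by omega, by omega, hres.2.2.1, hres.2.2.2⟩
  | case2 lo hi h mid hge ih =>
    intro h0 hlh hhn inv1 inv2
    have hmb := PySem.Int.floordiv_two_mid_bounds (lo := lo) (hi := hi) (le_of_lt h)
    have hmhi : mid < hi := by
      show PySem.Int.floordiv (lo + hi) 2 < hi
      rw [PySem.Int.floordiv_lt_iff_lt_mul (by omega)]; omega
    have hmlen : mid.toNat < s.length := by omega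
    have hget : PySem.List.pyGetD s mid 0 = s.getD mid.toNat 0 := by
      rw [PySem.List.pyGetD_eq_getElem s 0 (by omega) (lt_of_lt_of_le hmhi hhn)]
      rw [List.getD_eq_getElem s 0 hmlen]
    rw [hget] at hge
    push Not at hge
    have hres := ih h0 (by omega) (by omega) inv1
      (by
        intro k hk hk2
        rcases Int.lt_or_le (k : Int) hi with h' | h'
        · have hkm : mid.toNat ≤ k := by omega
          exact le_trans hge (getD_mono_of_pairwise s hp mid.toNat k hk hkm)
        · exact inv2 k hk h')
    refine ⟨by omega, by omega, hres.2.2.1, hres.2.2.2⟩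
  | case3 lo hi h =>
    intro h0 hlh hhn inv1 inv2
    have : lo = hi := by omega
    subst this
    exact ⟨le_refl _, le_refl _, inv1, fun k hk hk2 => inv2 k hk hk2⟩

theorem foldl_cut (m : Int) : ∀ (l : List Int) (a : Int),
    l.foldl (fun log i => if i ≥ m then log + (i - m) else log) a
    = a + (l.map (fun i => if m ≤ i then i - m else 0)).sum := by
  intro l
  induction l with
  | nil => intro a; simp
  | cons v t ih =>
    intro a
    simp only [List.foldl_cons, List.map_cons, List.sum_cons, ih]
    by_cases h : m ≤ v
    · simp [h, ge_iff_le]; ring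
    · simp [h, ge_iff_le]

theorem map_cut_lt (m : Int) (l : List Int) (h : ∀ i ∈ l, i < m) :
    (l.map (fun i => if m ≤ i then i - m else 0)).sum = 0 := by
  induction l with
  | nil => simp
  | cons v t ih =>
    have hv : ¬ m ≤ v := by have := h v (by simp); omega
    simp only [List.map_cons, List.sum_cons, if_neg hv, zero_add]
    exact ih (fun i hi => h i (by simp [hi]))

theorem map_cut_ge (m : Int) (l : List Int) (h : ∀ i ∈ l, m ≤ i) :
    (l.map (fun i => if m ≤ i then i - m else 0)).sum = l.sum - m * l.length := by
  induction l with
  | nil => simp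
  | cons v t ih =>
    have hv : m ≤ v := h v (by simp)
    simp only [List.map_cons, List.sum_cons, if_pos hv, List.length_cons]
    rw [ih (fun i hi => h i (by simp [hi]))]
    push_cast
    ring

theorem cut_eq (tree : List Int) (m : Int) :
    cutB (PySem.List.sorted tree (fun x => x) false)
         (prefixB (PySem.List.sorted tree (fun x => x) false)).1
         (prefixB (PySem.List.sorted tree (fun x => x) false)).2
         ((PySem.List.sorted tree (fun x => x) false).length : Int) m
    = cutA tree m := by
  set s := PySem.List.sorted tree (fun x => x) false with hs
  have hp : s.Pairwise (· ≤ ·) := PySem.List.sorted_pairwise tree (fun x => x)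
  have hperm : s.Perm tree := PySem.List.sorted_perm tree (fun x => x) false
  obtain ⟨hj0, hjn, hlt, hge⟩ := bisectB_spec s hp m 0 (s.length : Int)
    (le_refl 0) (Int.natCast_nonneg _) (le_refl _)
    (by intro k hk hk2; exfalso; omega)
    (by intro k hk hk2; exfalso; omega)
  set j := bisectB s m 0 (s.length : Int) with hj
  have h1 : ∀ i ∈ s.take j.toNat, i < m := by
    intro i hi
    obtain ⟨k, hk, rfl⟩ := List.mem_iff_getElem.mp hi
    have hk' : k < s.length := by
      have h₁ := List.length_take (i := j.toNat) (l := s); omega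
    rw [List.getElem_take]
    have := hlt k hk' (by simp at hk; omega)
    rwa [List.getD_eq_getElem s 0 hk'] at this
  have h2 : ∀ i ∈ s.drop j.toNat, m ≤ i := by
    intro i hi
    obtain ⟨k, hk, rfl⟩ := List.mem_iff_getElem.mp hi
    have hk1 := List.length_drop (i := j.toNat) (l := s)
    have hk' : j.toNat + k < s.length := by omega
    rw [List.getElem_drop]
    have := hge (j.toNat + k) hk' (by push_cast; omega)
    rwa [List.getD_eq_getElem s 0 hk'] at this
  have hpyg : PySem.List.pyGetD (0 :: prefAux s 0) j 0 = (s.take j.toNat).sum := by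
    rw [PySem.List.pyGetD_eq_getElem _ 0 hj0
      (by simp only [List.length_cons, prefAux_length]; push_cast; omega)]
    rw [← List.getD_eq_getElem _ 0]
    cases hk : j.toNat with
    | zero => simp
    | succ k =>
      have hkl : k < s.length := by omega
      simp only [List.getD_cons_succ]
      rw [prefAux_getD s k 0 hkl]
      simp
  have hcutA : cutA tree m = ((s.take j.toNat).map (fun i => if m ≤ i then i - m else 0)).sum
      + ((s.drop j.toNat).map (fun i => if m ≤ i then i - m else 0)).sum := by
    unfold cutA
    rw [foldl_cut m tree 0, zero_add]
    rw [← ((hperm.map (fun i => if m ≤ i then i - m else 0)).sum_eq)]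
    conv_lhs => rw [← List.take_append_drop j.toNat s]
    rw [List.map_append, List.sum_append]
  have hsum : s.sum = (s.take j.toNat).sum + (s.drop j.toNat).sum := by
    conv_lhs => rw [← List.take_append_drop j.toNat s]
    rw [List.sum_append]
  have hdl : ((s.drop j.toNat).length : Int) = (s.length : Int) - j := by
    have := List.length_drop (i := j.toNat) (l := s)
    push_cast [this]; omega
  unfold cutB
  rw [prefixB_eq]
  simp only [← hj]
  rw [hpyg, hcutA, map_cut_lt m _ h1, map_cut_ge m _ h2, hsum, hdl]
  ring

theorem loop_eq (demand : Int) (tree : List Int) (st en : Int) :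
    loopA demand tree st en
    = loopB demand (PySem.List.sorted tree (fun x => x) false)
        (prefixB (PySem.List.sorted tree (fun x => x) false)).1
        (prefixB (PySem.List.sorted tree (fun x => x) false)).2
        ((PySem.List.sorted tree (fun x => x) false).length : Int) st en := by
  fun_induction loopA demand tree st en with
  | case1 st en h mid log hlt ih => rw [loopB]; simp only [cut_eq]; rw [dif_pos h, if_pos hlt]; exact ih
  | case2 st en h mid log h1 h2 => rw [loopB]; simp only [cut_eq]; rw [dif_pos h, if_neg h1, if_pos h2]
  | case3 st en h mid log h1 h2 ih => rw [loopB]; simp only [cut_eq]; rw [dif_pos h, if_neg h1, if_neg h2]; exact ih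
  | case4 st en h => rw [loopB]; rw [dif_neg h]

theorem le_getLast_of_pairwise (xs : List Int) (h : xs.Pairwise (· ≤ ·)) (x : Int) (hx : x ∈ xs) (hne : xs ≠ []) :
    x ≤ xs.getLast hne := by
  obtain ⟨i, hi, rfl⟩ := List.mem_iff_getElem.mp hx
  rw [List.getLast_eq_getElem]
  rcases Nat.lt_or_ge i (xs.length - 1) with h' | h'
  · exact (List.pairwise_iff_getElem.mp h) i (xs.length - 1) hi (by omega) h'
  · have hieq : i = xs.length - 1 := by omega
    subst hieq; exact le_refl _

theorem pyGet?_neg_one_eq_getLast (xs : List Int) (h : xs ≠ []) :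
    PySem.List.pyGet? xs (-1) = some (xs.getLast h) := by
  have hl : 1 ≤ xs.length := List.length_pos_iff.mpr h |>.nat_succ_le
  simp [PySem.List.pyGet?, PySem.List.pyIdx?, hl, List.getLast_eq_getElem]

-- ===== VERDICT (by name: the statement is the Claim_ definition above) =====
theorem solution_spec : Claim_equal_solution := by
  intro demand tree _ hpre
  unfold Spec_solution
  have hperm : (PySem.List.sorted tree (fun x => x) false).Perm tree := PySem.List.sorted_perm tree (fun x => x) false
  have hsne : PySem.List.sorted tree (fun x => x) false ≠ [] := by
    intro h
    rw [h] at hperm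
    exact hpre (List.nil_perm.mp hperm)
  cases hmax : PySem.List.max? tree (fun x => x) with
  | none => exact absurd ((PySem.List.max?_eq_none_iff tree (fun x => x)).mp hmax) hpre
  | some m =>
    have hlast := pyGet?_neg_one_eq_getLast _ hsne
    have hmem_s : m ∈ PySem.List.sorted tree (fun x => x) false :=
      hperm.mem_iff.mpr (PySem.List.max?_mem hmax)
    have hpair : (PySem.List.sorted tree (fun x => x) false).Pairwise (· ≤ ·) :=
      PySem.List.sorted_pairwise tree (fun x => x)
    have h1 : m ≤ (PySem.List.sorted tree (fun x => x) false).getLast hsne :=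
      le_getLast_of_pairwise _ hpair m hmem_s hsne
    have h2 : (PySem.List.sorted tree (fun x => x) false).getLast hsne ≤ m :=
      PySem.List.max?_isMax hmax _ (hperm.mem_iff.mp (List.getLast_mem hsne))
    have hml : m = (PySem.List.sorted tree (fun x => x) false).getLast hsne := le_antisymm h1 h2
    show solution demand tree = solution_alt demand tree
    simp only [solution, solution_alt, hmax, hlast]
    rw [← hml]
    exact loop_eq demand tree 1 m
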